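-- pv_equiv track=rewrite | github.com/qiujiabao/artist_recommend | train.py | getArtists
-- ===== SOURCE A (Python) =====
-- def getArtists(input, artists):
--     similar_artists = []
--     for i in range(len(artists)):
--         for j in range(len(similar_artists)):
--             if artists[i] == similar_artists[j]:
--                 break
--             elif artists[i] == input:
--                 break
--         similar_artists.append(artists[i])
--         if len(similar_artists) > 5:
--             break
--     return similar_artists
-- ===== SOURCE B (Python) =====
-- def getArtists(input, artists):
--     # A's inner loop only breaks out of itself and every iteration appends
--     # artists[i], stopping once six are collected: the result is the first
--     # six elements. B returns that directly as a fresh slice.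
--     return artists[:6]
-- ===== Notes on version B (the rewrite author's own statement) =====
-- stated objective: simpler
-- what changed: Replaced the nested loops with dead inner branches and an accumulating break-at-six loop by a single closed-form slice artists[:6].
import Mathlib
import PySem

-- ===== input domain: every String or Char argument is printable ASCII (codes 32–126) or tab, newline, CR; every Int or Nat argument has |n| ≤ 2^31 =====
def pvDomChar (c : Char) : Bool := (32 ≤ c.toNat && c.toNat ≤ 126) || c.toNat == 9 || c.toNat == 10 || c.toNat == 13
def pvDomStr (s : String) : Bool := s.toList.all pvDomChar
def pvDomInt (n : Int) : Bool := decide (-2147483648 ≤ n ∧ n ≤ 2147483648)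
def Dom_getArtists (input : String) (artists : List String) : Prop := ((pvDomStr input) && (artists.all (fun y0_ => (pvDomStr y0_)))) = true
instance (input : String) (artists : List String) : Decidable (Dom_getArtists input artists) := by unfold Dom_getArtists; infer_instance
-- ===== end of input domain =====

-- B replaces A's accumulating loop (whose inner loop only breaks out of itself) by the closed-form slice artists[:6]; objective: simpler.

-- ===== PORT A =====
-- inner loop: 'for j in range(len(similar_artists)): if artists[i]==similar_artists[j]: break elif artists[i]==input: break'
-- only breaks out of itself and changes no state; ported faithfully as a scan returning Unit.
def getArtistsInner (x : String) (input : String) : List String → Unit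
  | [] => ()
  | s :: rest => if x == s then () else if x == input then () else getArtistsInner x input rest

-- outer loop over i = 0 .. len-1 with accumulator similar_artists and the 'len > 5' break
def getArtistsLoop (input : String) (artists : List String) : Nat → List String → List String
  | i, sim =>
    if h : i < artists.length then
      let _ := getArtistsInner artists[i] input sim
      let sim' := sim ++ [artists[i]]
      if sim'.length > 5 then sim'
      else getArtistsLoop input artists (i + 1) sim'
    else sim
  termination_by i _ => artists.length - i

def getArtists (input : String) (artists : List String) : List String :=
  getArtistsLoop input artists 0 []

-- ===== PORT B =====
def getArtists_alt (input : String) (artists : List String) : List String :=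
  artists.take 6

-- ===== PRECONDITION & SPEC =====
def Spec_getArtists (input : String) (artists : List String) (out : List String) : Prop := out = getArtists_alt input artists
instance (input : String) (artists : List String) (out : List String) : Decidable (Spec_getArtists input artists out) := by unfold Spec_getArtists; infer_instance

-- ===== CLAIM (what is proved, stated in full; the proofs are below) =====
def Claim_equal_getArtists : Prop := ∀ (input : String) (artists : List String), Dom_getArtists input artists → Spec_getArtists input artists (getArtists input artists)

-- ===== LEMMAS AND PROOFS =====
theorem getArtistsLoop_eq (input : String) (artists : List String) :
    ∀ i sim, sim.length < 6 →
      getArtistsLoop input artists i sim = sim ++ (artists.drop i).take (6 - sim.length) := by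
  intro i
  induction' hn : artists.length - i using Nat.strong_induction_on with n ih generalizing i
  intro sim hsim
  rw [getArtistsLoop]
  by_cases h : i < artists.length
  · simp only [dif_pos h]
    have hdrop : artists.drop i = artists[i] :: artists.drop (i + 1) :=
      (List.drop_eq_getElem_cons h)
    by_cases h6 : (sim ++ [artists[i]]).length > 5
    · simp only [if_pos h6]
      have h5 : sim.length = 5 := by simp at h6 ⊢; omega
      rw [hdrop, h5]
      simp
      rw [hdrop]
      rfl
    · simp only [if_neg h6]
      have hlen : (sim ++ [artists[i]]).length < 6 := by simp at h6 ⊢; omega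
      rw [ih (artists.length - (i+1)) (by omega) (i+1) rfl _ hlen]
      rw [hdrop]
      have h6k : 6 - sim.length = (6 - (sim ++ [artists[i]]).length) + 1 := by
        simp at hlen ⊢; omega
      rw [h6k, List.take_succ_cons]
      simp
  · simp only [dif_neg h]
    have : artists.drop i = [] := List.drop_eq_nil_of_le (by omega)
    simp [this]

-- ===== VERDICT (by name: the statement is the Claim_ definition above) =====
theorem getArtists_spec : Claim_equal_getArtists := by
  intro input artists _
  unfold Spec_getArtists getArtists getArtists_alt
  rw [getArtistsLoop_eq input artists 0 [] (by simp)]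
  simp
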